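-- pv_equiv track=rewrite | github.com/sfc-gh-omizrachi/SI_Data_Generator | demo_content.py | format_questions_for_display
-- ===== SOURCE A (Python) =====
-- from typing import Dict, List, Optional, Tuple, Any
--
-- def format_questions_for_display(
--     questions: List[Dict[str, Any]]
-- ) -> str:
--     """
--     Format questions for display in UI.
--
--     Args:
--         questions: List of question dictionaries
--
--     Returns:
--         Formatted markdown string
--     """
--     output = "## Generated Questions\n\n"
--
--     basic_questions = [
--         q for q in questions if q.get('difficulty') == 'basic'
--     ]
--     intermediate_questions = [
--         q for q in questions if q.get('difficulty') == 'intermediate'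
--     ]
--     advanced_questions = [
--         q for q in questions if q.get('difficulty') == 'advanced'
--     ]
--
--     if basic_questions:
--         output += "### Basic Questions\n\n"
--         for idx, q in enumerate(basic_questions, 1):
--             output += f"{idx}. {q['text']}\n"
--         output += "\n"
--
--     if intermediate_questions:
--         output += "### Intermediate Questions\n\n"
--         for idx, q in enumerate(intermediate_questions, 1):
--             output += f"{idx}. {q['text']}\n"
--         output += "\n"
--
--     if advanced_questions:
--         output += "### Advanced Questions\n\n"
--         for idx, q in enumerate(advanced_questions, 1):
--             output += f"{idx}. {q['text']}\n"
--         output += "\n"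
--
--     return output
-- ===== SOURCE B (Python) =====
-- def format_questions_for_display(questions):
--     """Single streaming pass: format each question's numbered line immediately into its
--     section's string accumulator (with a per-section counter); no intermediate lists."""
--     basic_body = inter_body = adv_body = ""
--     nb = ni = na = 0
--     for q in questions:
--         d = q.get('difficulty')
--         if d == 'basic':
--             nb += 1
--             basic_body += f"{nb}. {q['text']}\n"
--         elif d == 'intermediate':
--             ni += 1
--             inter_body += f"{ni}. {q['text']}\n"
--         elif d == 'advanced':
--             na += 1
--             adv_body += f"{na}. {q['text']}\n"
--     out = "## Generated Questions\n\n"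
--     if basic_body:
--         out += "### Basic Questions\n\n" + basic_body + "\n"
--     if inter_body:
--         out += "### Intermediate Questions\n\n" + inter_body + "\n"
--     if adv_body:
--         out += "### Advanced Questions\n\n" + adv_body + "\n"
--     return out
-- ===== Notes on version B (the rewrite author's own statement) =====
-- stated objective: simpler
-- what changed: A's three filter passes plus three copy-pasted enumerate blocks are replaced by one streaming pass that formats each numbered line immediately into a per-difficulty string accumulator with its own counter (no intermediate question lists), followed by a fixed header/footer assembly.
import Mathlib
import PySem

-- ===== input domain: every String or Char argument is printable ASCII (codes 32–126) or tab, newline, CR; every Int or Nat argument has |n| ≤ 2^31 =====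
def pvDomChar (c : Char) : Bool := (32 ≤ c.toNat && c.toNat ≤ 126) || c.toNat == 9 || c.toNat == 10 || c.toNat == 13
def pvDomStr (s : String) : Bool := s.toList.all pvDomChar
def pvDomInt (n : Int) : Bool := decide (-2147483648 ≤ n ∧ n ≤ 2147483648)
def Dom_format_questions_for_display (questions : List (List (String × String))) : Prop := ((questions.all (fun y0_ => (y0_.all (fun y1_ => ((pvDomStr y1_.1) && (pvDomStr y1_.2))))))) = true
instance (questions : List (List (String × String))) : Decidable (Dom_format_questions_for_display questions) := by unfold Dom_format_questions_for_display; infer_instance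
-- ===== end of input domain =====

-- B replaces A's three filter passes + three copy-pasted enumerate blocks by ONE streaming
-- pass that formats each numbered line directly into a per-difficulty string accumulator
-- with its own counter — no intermediate question lists (objective: simpler).

-- ===== PORT A =====
-- A's inner 'for idx, q in enumerate(section, 1): output += f"{idx}. {q['text']}\n"'
-- (q['text'] is defined under Pre_, where 'text' is present in every selected question)
def fqdEmit : List (List (String × String)) → Int → String → String
  | [], _, out => out
  | q :: rest, idx, out =>
      fqdEmit rest (idx + 1) (out ++ PySem.Int.toStr idx ++ ". " ++ (PySem.Dict.mk q).getD "text" "" ++ "\n")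

def format_questions_for_display (questions : List (List (String × String))) : String :=
  let output0 := "## Generated Questions\n\n"
  let basic := questions.filter (fun q => (PySem.Dict.mk q).get? "difficulty" == some "basic")
  let inter := questions.filter (fun q => (PySem.Dict.mk q).get? "difficulty" == some "intermediate")
  let adv := questions.filter (fun q => (PySem.Dict.mk q).get? "difficulty" == some "advanced")
  let output1 := if basic.isEmpty then output0 else fqdEmit basic 1 (output0 ++ "### Basic Questions\n\n") ++ "\n"
  let output2 := if inter.isEmpty then output1 else fqdEmit inter 1 (output1 ++ "### Intermediate Questions\n\n") ++ "\n"
  let output3 := if adv.isEmpty then output2 else fqdEmit adv 1 (output2 ++ "### Advanced Questions\n\n") ++ "\n"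
  output3

-- ===== PORT B =====
-- B's loop state: the three string accumulators and the three counters, in B's order.
def fqdLoop : List (List (String × String)) → String × String × String × Int × Int × Int →
    String × String × String × Int × Int × Int
  | [], st => st
  | q :: rest, (sb, si, sa, nb, ni, na) =>
      let d := (PySem.Dict.mk q).get? "difficulty"
      if d == some "basic" then
        fqdLoop rest (sb ++ PySem.Int.toStr (nb + 1) ++ ". " ++ (PySem.Dict.mk q).getD "text" "" ++ "\n", si, sa, nb + 1, ni, na)
      else if d == some "intermediate" then
        fqdLoop rest (sb, si ++ PySem.Int.toStr (ni + 1) ++ ". " ++ (PySem.Dict.mk q).getD "text" "" ++ "\n", sa, nb, ni + 1, na)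
      else if d == some "advanced" then
        fqdLoop rest (sb, si, sa ++ PySem.Int.toStr (na + 1) ++ ". " ++ (PySem.Dict.mk q).getD "text" "" ++ "\n", nb, ni, na + 1)
      else fqdLoop rest (sb, si, sa, nb, ni, na)

def format_questions_for_display_alt (questions : List (List (String × String))) : String :=
  let st := fqdLoop questions ("", "", "", 0, 0, 0)
  let out0 := "## Generated Questions\n\n"
  -- Python's 'if basic_body:' is the nonemptiness test on the accumulated string
  let out1 := if st.1.isEmpty then out0 else out0 ++ "### Basic Questions\n\n" ++ st.1 ++ "\n"
  let out2 := if st.2.1.isEmpty then out1 else out1 ++ "### Intermediate Questions\n\n" ++ st.2.1 ++ "\n"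
  let out3 := if st.2.2.1.isEmpty then out2 else out2 ++ "### Advanced Questions\n\n" ++ st.2.2.1 ++ "\n"
  out3

-- ===== PRECONDITION & SPEC =====
-- Pre_ excludes exactly the inputs where a question whose 'difficulty' is one of the three
-- displayed categories lacks the 'text' key: there both Pythons raise KeyError.
def Pre_format_questions_for_display (questions : List (List (String × String))) : Prop :=
  ∀ q ∈ questions,
    ((PySem.Dict.mk q).get? "difficulty" = some "basic" ∨
     (PySem.Dict.mk q).get? "difficulty" = some "intermediate" ∨
     (PySem.Dict.mk q).get? "difficulty" = some "advanced") →
    (PySem.Dict.mk q).contains "text" = true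
instance (questions : List (List (String × String))) : Decidable (Pre_format_questions_for_display questions) := by unfold Pre_format_questions_for_display; infer_instance

def pvWitness_format_questions_for_display : (List (List (String × String))) :=
  [[("difficulty", "basic"), ("text", "What is a table?")],
   [("difficulty", "advanced"), ("text", "Explain joins.")]]

def Spec_format_questions_for_display (questions : List (List (String × String))) (out : String) : Prop := out = format_questions_for_display_alt questions
instance (questions : List (List (String × String))) (out : String) : Decidable (Spec_format_questions_for_display questions out) := by unfold Spec_format_questions_for_display; infer_instance

-- ===== CLAIM (what is proved, stated in full; the proofs are below) =====
def Claim_equal_format_questions_for_display : Prop := ∀ (questions : List (List (String × String))), Dom_format_questions_for_display questions → Pre_format_questions_for_display questions → Spec_format_questions_for_display questions (format_questions_for_display questions)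

-- ===== LEMMAS AND PROOFS =====

-- one formatted line
def fqdLine (n : Int) (q : List (String × String)) : String :=
  PySem.Int.toStr n ++ ". " ++ (PySem.Dict.mk q).getD "text" "" ++ "\n"

def sJoin : List String → String
  | [] => ""
  | x :: l => x ++ sJoin l

-- the body a section accumulates, as a function of the filtered list and the start counter
def fqdBody (qs : List (List (String × String))) (n : Int) : String :=
  sJoin ((PySem.List.enumerate qs (n + 1)).map (fun p => fqdLine p.1 p.2))

theorem fqdBody_nil (n : Int) : fqdBody [] n = "" := by
  simp [fqdBody, PySem.List.enumerate, sJoin]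

theorem fqdBody_cons (q : List (String × String)) (t : List (List (String × String))) (n : Int) :
    fqdBody (q :: t) n = fqdLine (n + 1) q ++ fqdBody t (n + 1) := by
  simp [fqdBody, PySem.List.enumerate_cons, sJoin]

theorem fqdLoop_eq (qs : List (List (String × String)))
    (sb si sa : String) (nb ni na : Int) :
    fqdLoop qs (sb, si, sa, nb, ni, na) =
      (sb ++ fqdBody (qs.filter (fun q => (PySem.Dict.mk q).get? "difficulty" == some "basic")) nb,
       si ++ fqdBody (qs.filter (fun q => (PySem.Dict.mk q).get? "difficulty" == some "intermediate")) ni,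
       sa ++ fqdBody (qs.filter (fun q => (PySem.Dict.mk q).get? "difficulty" == some "advanced")) na,
       nb + ((qs.filter (fun q => (PySem.Dict.mk q).get? "difficulty" == some "basic")).length : Int),
       ni + ((qs.filter (fun q => (PySem.Dict.mk q).get? "difficulty" == some "intermediate")).length : Int),
       na + ((qs.filter (fun q => (PySem.Dict.mk q).get? "difficulty" == some "advanced")).length : Int)) := by
  induction qs generalizing sb si sa nb ni na with
  | nil => simp [fqdLoop, fqdBody_nil]
  | cons q t ih =>
    simp only [fqdLoop, List.filter_cons]
    split_ifs with h1 h2 h3 <;>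
      simp_all [fqdBody_cons, fqdLine, String.append_assoc, add_assoc] <;> omega

-- a body string is empty iff the section is empty
theorem fqdBody_eq_empty_iff (qs : List (List (String × String))) (n : Int) :
    fqdBody qs n = "" ↔ qs = [] := by
  cases qs with
  | nil => simp [fqdBody_nil]
  | cons q t =>
    refine iff_of_false (fun h => ?_) (by simp)
    rw [fqdBody_cons] at h
    have := congrArg String.toList h
    simp [fqdLine] at this

-- A's emit loop produces header-relative the same body string
theorem fqdEmit_eq (qs : List (List (String × String))) (n : Int) (acc : String) :
    fqdEmit qs (n + 1) acc = acc ++ fqdBody qs n := by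
  induction qs generalizing n acc with
  | nil => simp [fqdEmit, fqdBody_nil]
  | cons q t ih =>
    show fqdEmit t (n + 1 + 1) _ = _
    rw [ih (n + 1)]
    simp [fqdBody_cons, fqdLine, String.append_assoc]

theorem format_questions_for_display_eq (questions : List (List (String × String))) :
    format_questions_for_display questions = format_questions_for_display_alt questions := by
  unfold format_questions_for_display format_questions_for_display_alt
  rw [fqdLoop_eq]
  simp only []
  set B := questions.filter (fun q => (PySem.Dict.mk q).get? "difficulty" == some "basic") with hB
  set I := questions.filter (fun q => (PySem.Dict.mk q).get? "difficulty" == some "intermediate") with hI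
  set A := questions.filter (fun q => (PySem.Dict.mk q).get? "difficulty" == some "advanced") with hA
  have e1 : fqdEmit B 1 = fun acc => acc ++ fqdBody B 0 := by
    funext acc; exact (by simpa using fqdEmit_eq B 0 acc)
  have e2 : fqdEmit I 1 = fun acc => acc ++ fqdBody I 0 := by
    funext acc; exact (by simpa using fqdEmit_eq I 0 acc)
  have e3 : fqdEmit A 1 = fun acc => acc ++ fqdBody A 0 := by
    funext acc; exact (by simpa using fqdEmit_eq A 0 acc)
  simp only [e1, e2, e3]
  by_cases hb : B = [] <;> by_cases hi : I = [] <;> by_cases ha : A = [] <;>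
    simp [hb, hi, ha, fqdBody_nil, fqdBody_eq_empty_iff, String.append_assoc]

-- ===== VERDICT (by name: the statement is the Claim_ definition above) =====
theorem format_questions_for_display_spec : Claim_equal_format_questions_for_display := by
  intro questions _ _
  exact format_questions_for_display_eq questions
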